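-- pv_equiv track=rewrite | github.com/Epsilon-Infinity/Hash-Code-Practice | seth.py | small_ended
-- ===== SOURCE A (Python) =====
-- def small_ended(M, P):
--
--     sums = {}
--     tot = 0
--
--     for i, z in enumerate(P):
--
--         if tot+z > M:
--             break
--
--         tot += z
--
--         sums[i] = z
--
--     return sums
-- ===== SOURCE B (Python) =====
-- def small_ended(M, P):
--     # phase 1: prefix sums
--     prefix = []
--     tot = 0
--     for z in P:
--         tot += z
--         prefix.append(tot)
--     # phase 2: cutoff = number of leading prefix sums <= M
--     k = 0
--     for s in prefix:
--         if s > M: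
--             break
--         k += 1
--     # phase 3: build the result from the admitted prefix
--     return dict(enumerate(P[:k]))
-- ===== Notes on version B (the rewrite author's own statement) =====
-- stated objective: alternative
-- what changed: Replaces A's single fused accumulate-test-and-insert loop with three separate phases: a prefix-sum pass, a cutoff scan finding how many prefix sums stay <= M, and dict(enumerate(P[:k])) to build the result.
import Mathlib
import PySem

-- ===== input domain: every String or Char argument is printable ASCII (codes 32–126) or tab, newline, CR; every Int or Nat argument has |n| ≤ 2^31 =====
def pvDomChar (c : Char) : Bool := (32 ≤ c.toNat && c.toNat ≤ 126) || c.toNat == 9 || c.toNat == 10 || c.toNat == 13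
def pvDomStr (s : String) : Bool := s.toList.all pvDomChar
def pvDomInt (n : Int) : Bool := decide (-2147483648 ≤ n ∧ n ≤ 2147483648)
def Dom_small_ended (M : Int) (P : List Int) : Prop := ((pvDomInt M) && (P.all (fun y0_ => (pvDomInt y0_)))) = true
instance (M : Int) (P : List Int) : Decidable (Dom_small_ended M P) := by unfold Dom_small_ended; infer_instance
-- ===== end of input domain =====

-- B replaces A's fused accumulate-test-insert loop (with break) by three phases:
-- prefix sums, a cutoff scan counting leading prefix sums <= M, and enumeration of
-- the admitted prefix (alternative decomposition, same O(n) cost).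


-- ===== PORT A =====
-- A's loop: enumerate P carrying the running total; on tot+z > M, break; else insert (i, z).
-- Keys i are fresh and increasing, so dict insertion is appending to the association list.
def smallA_loop (M : Int) (tot : Int) (i : Int) : List Int → List (Int × Int)
  | [] => []
  | z :: rest => if tot + z > M then [] else (i, z) :: smallA_loop M (tot + z) (i + 1) rest

def small_ended (M : Int) (P : List Int) : List (Int × Int) := smallA_loop M 0 0 P

-- ===== PORT B =====
-- phase 1: prefix sums (running total appended for each element)
def pvPrefixSums (tot : Int) : List Int → List Int
  | [] => []
  | z :: rest => (tot + z) :: pvPrefixSums (tot + z) rest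

-- phase 2: cutoff scan — count leading prefix sums ≤ M (the for-loop with break in Source B)
def pvCutoff (M : Int) : List Int → Nat
  | [] => 0
  | s :: rest => if s > M then 0 else pvCutoff M rest + 1

-- phase 3: dict(enumerate(P[:k])); P[:k] with k ≥ 0 is List.take k, enumerate pairs
-- each element with its 0-based index (Int key, as Python ints)
def pvEnumFrom (i : Int) : List Int → List (Int × Int)
  | [] => []
  | z :: rest => (i, z) :: pvEnumFrom (i + 1) rest

def small_ended_alt (M : Int) (P : List Int) : List (Int × Int) :=
  pvEnumFrom 0 (P.take (pvCutoff M (pvPrefixSums 0 P)))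

-- ===== PRECONDITION & SPEC =====
def Spec_small_ended (M : Int) (P : List Int) (out : List (Int × Int)) : Prop := out = small_ended_alt M P
instance (M : Int) (P : List Int) (out : List (Int × Int)) : Decidable (Spec_small_ended M P out) := by unfold Spec_small_ended; infer_instance

-- ===== CLAIM (what is proved, stated in full; the proofs are below) =====
def Claim_equal_small_ended : Prop := ∀ (M : Int) (P : List Int), Dom_small_ended M P → Spec_small_ended M P (small_ended M P)

-- ===== LEMMAS AND PROOFS =====
theorem smallA_loop_eq (M : Int) :
    ∀ (P : List Int) (tot i : Int),
      smallA_loop M tot i P = pvEnumFrom i (P.take (pvCutoff M (pvPrefixSums tot P))) := by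
  intro P
  induction P with
  | nil => intro tot i; rfl
  | cons z rest ih =>
    intro tot i
    by_cases h : tot + z > M
    · simp [smallA_loop, pvPrefixSums, pvCutoff, h, pvEnumFrom]
    · simp [smallA_loop, pvPrefixSums, pvCutoff, h, pvEnumFrom, ih]

-- ===== VERDICT (by name: the statement is the Claim_ definition above) =====
theorem small_ended_spec : Claim_equal_small_ended := by
  intro M P _
  unfold Spec_small_ended small_ended small_ended_alt
  exact smallA_loop_eq M P 0 0
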